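-- pv_equiv track=rewrite | github.com/Den-Larin/Labs | 4.py | count_previous
-- ===== SOURCE A (Python) =====
-- def count_previous(text):
--     words = text.split()
--     word_counts = {}
--     previous_counts = []
--     for word in words:
--         if word not in word_counts:
--             word_counts[word] = 0
--         previous_counts.append(word_counts[word])
--         word_counts[word] += 1
--     return previous_counts
-- ===== SOURCE B (Python) =====
-- def count_previous(text):
--     words = text.split()
--     return [words[:i].count(word) for i, word in enumerate(words)]
-- ===== Notes on version B (the rewrite author's own statement) =====
-- stated objective: simpler
-- what changed: Replaces the running dictionary of counts with a stateless list comprehension that counts each word in the prefix slice words[:i].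
import Mathlib
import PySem

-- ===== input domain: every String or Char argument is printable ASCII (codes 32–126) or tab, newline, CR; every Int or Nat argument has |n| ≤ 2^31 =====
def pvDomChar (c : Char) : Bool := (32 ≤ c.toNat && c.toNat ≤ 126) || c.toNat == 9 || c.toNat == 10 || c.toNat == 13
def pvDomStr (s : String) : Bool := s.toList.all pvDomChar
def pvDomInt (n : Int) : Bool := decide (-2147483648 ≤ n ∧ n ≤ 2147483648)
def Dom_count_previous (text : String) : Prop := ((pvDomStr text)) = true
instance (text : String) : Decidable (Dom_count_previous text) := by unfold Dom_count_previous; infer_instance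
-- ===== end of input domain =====

-- B replaces A's running dictionary of counts with a stateless list comprehension
-- counting each word in its prefix slice (simpler, no accumulated state; not faster).


-- ===== PORT A =====
-- one loop step: ensure the word has a dict entry, append its current count, bump it
def count_previous_step (st : PySem.Dict String Int × List Int) (word : String) :
    PySem.Dict String Int × List Int :=
  let wc := if st.1.contains word then st.1 else st.1.insert word 0
  (wc.insert word (wc.getD word 0 + 1), st.2 ++ [wc.getD word 0])

def count_previous (text : String) : List Int :=
  let words := PySem.Str.split₀ text
  (words.foldl count_previous_step (PySem.Dict.empty, [])).2

-- ===== PORT B =====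
def count_previous_alt (text : String) : List Int :=
  let words := PySem.Str.split₀ text
  (PySem.List.enumerate words).map
    (fun p => ((PySem.List.slice words none (some p.1)).count p.2 : Int))

-- ===== PRECONDITION & SPEC =====
def Spec_count_previous (text : String) (out : List Int) : Prop := out = count_previous_alt text
instance (text : String) (out : List Int) : Decidable (Spec_count_previous text out) := by unfold Spec_count_previous; infer_instance

-- ===== CLAIM (what is proved, stated in full; the proofs are below) =====
def Claim_equal_count_previous : Prop := ∀ (text : String), Dom_count_previous text → Spec_count_previous text (count_previous text)

-- ===== LEMMAS AND PROOFS =====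

lemma count_previous_loop (rest pre : List String) (d : PySem.Dict String Int)
    (acc : List Int) (hinv : ∀ w, d.getD w 0 = (pre.count w : Int)) :
    (rest.foldl count_previous_step (d, acc)).2 =
      acc ++ (PySem.List.enumerate rest (pre.length : Int)).map
        (fun p => ((PySem.List.slice (pre ++ rest) none (some p.1)).count p.2 : Int)) := by
  induction rest generalizing pre d acc with
  | nil => simp [PySem.List.enumerate]
  | cons word rest ih =>
      have hwc : ∀ w, (if d.contains word then d else d.insert word 0).getD w 0 =
          d.getD w 0 := by
        intro w
        by_cases h : d.contains word
        · simp [h]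
        · rw [if_neg h, PySem.Dict.getD_insert]
          split_ifs with hw
        
          · subst hw
            have : d.get? w = none := (PySem.Dict.get?_eq_none_iff_contains d w).2 (by simp [h])
            simp [PySem.Dict.getD, this]
          · rfl
      have hinv' : ∀ w,
          ((if d.contains word then d else d.insert word 0).insert word
            ((if d.contains word then d else d.insert word 0).getD word 0 + 1)).getD w 0 =
          ((pre ++ [word]).count w : Int) := by
        intro w
        rw [PySem.Dict.getD_insert]
        by_cases hw : w = word
        · subst hw
          rw [if_pos rfl, hwc w, hinv w]
          simp [List.count_append]
        · rw [if_neg hw, hwc w, hinv w]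
          simp [List.count_append, Ne.symm hw]
      rw [List.foldl_cons]
      have hstep : count_previous_step (d, acc) word =
          ((if d.contains word then d else d.insert word 0).insert word
            ((if d.contains word then d else d.insert word 0).getD word 0 + 1),
           acc ++ [(if d.contains word then d else d.insert word 0).getD word 0]) := rfl
      rw [hstep, ih (pre ++ [word]) _ _ hinv']
      -- head element is the count of word in pre; the enumerate start shifts by one
      have hhead : (if d.contains word then d else d.insert word 0).getD word 0 =
          ((PySem.List.slice (pre ++ word :: rest) none (some (pre.length : Int))).count word : Int) := by
        rw [hwc, hinv word, PySem.List.slice_to_natCast]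
        rw [List.take_left' rfl]
      have hstart : (((pre ++ [word]).length : Nat) : Int) = ((pre.length : Nat) : Int) + 1 := by
        simp [List.length_append]
      have hlist : pre ++ [word] ++ rest = pre ++ word :: rest := by simp
      rw [PySem.List.enumerate_cons, hstart, hlist, hhead]
      simp

-- ===== VERDICT (by name: the statement is the Claim_ definition above) =====
theorem count_previous_spec : Claim_equal_count_previous := by
  intro text _
  unfold Spec_count_previous count_previous count_previous_alt
  have h := count_previous_loop (PySem.Str.split₀ text) [] PySem.Dict.empty []
    (by intro w; simp [PySem.Dict.getD, PySem.Dict.empty, PySem.Dict.get?])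
  simpa using h
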